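-- pv_equiv track=rewrite | github.com/boostcampwm-2021-iOS10-Jipjung/Study-Algorithm | S034/211220/카드_짝맞추기.py | get_card_orders
-- ===== SOURCE A (Python) =====
-- from itertools import permutations
--
-- def get_card_orders(cards):
--     card_count = len(cards)
--     permutation_cards = list(permutations(cards, card_count))
--     card_orders = []
--     temp = []
--     def dfs(permutation_card, i):
--         if i == card_count:
--             card_orders.append(temp[:])
--             return
--         for j in range(2):
--             temp.append((permutation_card[i], j))
--             temp.append((permutation_card[i], (j + 1) % 2))
--             dfs(permutation_card, i + 1)
--             temp.pop()
--             temp.pop()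
--     for permutation_card in permutation_cards:
--         dfs(permutation_card, 0)
--     return card_orders
-- ===== SOURCE B (Python) =====
-- from itertools import permutations
--
-- def get_card_orders(cards):
--     result = []
--     for perm in permutations(cards, len(cards)):
--         orderings = [[]]
--         for card in perm:
--             extended = []
--             for ordering in orderings:
--                 extended.append(ordering + [(card, 0), (card, 1)])
--                 extended.append(ordering + [(card, 1), (card, 0)])
--             orderings = extended
--         result.extend(orderings)
--     return result
-- ===== Notes on version B (the rewrite author's own statement) =====
-- stated objective: alternative
-- what changed: Replaces the recursive DFS with an explicit stack (temp append/pop) by an iterative breadth-wise build: for each permutation, a list of partial orderings is extended one card at a time with both flip orders, deepest position varying fastest as in A.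
import Mathlib
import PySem

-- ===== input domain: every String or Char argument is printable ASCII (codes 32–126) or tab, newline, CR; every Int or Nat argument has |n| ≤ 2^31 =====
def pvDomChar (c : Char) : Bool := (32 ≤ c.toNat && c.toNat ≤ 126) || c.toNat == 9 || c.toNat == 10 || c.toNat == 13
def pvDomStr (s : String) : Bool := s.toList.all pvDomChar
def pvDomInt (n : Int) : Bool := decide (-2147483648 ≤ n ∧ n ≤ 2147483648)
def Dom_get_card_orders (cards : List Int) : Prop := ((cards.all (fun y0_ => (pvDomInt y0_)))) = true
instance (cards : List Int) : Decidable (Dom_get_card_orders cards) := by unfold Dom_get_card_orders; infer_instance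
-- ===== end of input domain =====

-- B replaces A's recursive DFS (shared temp with append/pop) by an iterative breadth-wise
-- build of all orderings per permutation (objective: alternative; same cost).

-- ===== PORT A =====
-- dfs(permutation_card, i): fuel = card_count - i keeps the recursion structural;
-- fuel = 0 is exactly the Python's 'i == card_count' branch.
def dfsA (perm : List Int) (fuel : Nat) (i : Nat) (temp : List (Int × Int))
    (acc : List (List (Int × Int))) : List (List (Int × Int)) :=
  match fuel with
  | 0 => acc ++ [temp]                                  -- card_orders.append(temp[:])
  | Nat.succ f =>
    (PySem.List.pyRange 0 2 1).foldl (fun acc j =>      -- for j in range(2)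
      dfsA perm f (i + 1)
        (temp ++ [(PySem.List.pyGetD perm (i : Int) 0, j),
                  (PySem.List.pyGetD perm (i : Int) 0, PySem.Int.mod (j + 1) 2)])
        acc) acc

def get_card_orders (cards : List Int) : List (List (Int × Int)) :=
  let card_count := cards.length
  let permutation_cards := PySem.List.permutations cards card_count
  permutation_cards.foldl (fun card_orders p => dfsA p card_count 0 [] card_orders) []

-- ===== PORT B =====
def extendOne (card : Int) (orderings : List (List (Int × Int))) : List (List (Int × Int)) :=
  orderings.foldl (fun ext o =>
    ext ++ [o ++ [(card, 0), (card, 1)], o ++ [(card, 1), (card, 0)]]) []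

def buildOrders (perm : List Int) : List (List (Int × Int)) :=
  perm.foldl (fun orderings card => extendOne card orderings) [[]]

def get_card_orders_alt (cards : List Int) : List (List (Int × Int)) :=
  (PySem.List.permutations cards cards.length).foldl
    (fun result p => result ++ buildOrders p) []

-- ===== PRECONDITION & SPEC =====
def Spec_get_card_orders (cards : List Int) (out : List (List (Int × Int))) : Prop := out = get_card_orders_alt cards
instance (cards : List Int) (out : List (List (Int × Int))) : Decidable (Spec_get_card_orders cards out) := by unfold Spec_get_card_orders; infer_instance

-- ===== CLAIM (what is proved, stated in full; the proofs are below) =====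
def Claim_equal_get_card_orders : Prop := ∀ (cards : List Int), Dom_get_card_orders cards → Spec_get_card_orders cards (get_card_orders cards)

-- ===== LEMMAS AND PROOFS =====

/-- Reference shape of the per-permutation result: choices at earlier positions vary slower. -/
def ordersRec : List Int → List (List (Int × Int))
  | [] => [[]]
  | c :: rest =>
      ((ordersRec rest).map (fun r => [(c, 0), (c, 1)] ++ r)) ++
      ((ordersRec rest).map (fun r => [(c, 1), (c, 0)] ++ r))

theorem extendOne_eq_flatMap (c : Int) (os : List (List (Int × Int))) :
    extendOne c os = os.flatMap (fun o => [o ++ [(c, 0), (c, 1)], o ++ [(c, 1), (c, 0)]]) := by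
  unfold extendOne
  rw [PySem.List.foldl_append_eq_flatMap]
  simp

theorem foldl_extendOne (l : List Int) (os : List (List (Int × Int))) :
    l.foldl (fun orderings card => extendOne card orderings) os
      = os.flatMap (fun o => (ordersRec l).map (o ++ ·)) := by
  induction l generalizing os with
  | nil => simp [ordersRec]
  | cons c rest ih =>
      rw [List.foldl_cons, extendOne_eq_flatMap, ih, List.flatMap_assoc]
      simp only [ordersRec, List.map_append, List.map_map, Function.comp_def,
        List.append_assoc, List.flatMap_cons, List.flatMap_nil, List.append_nil,
        List.cons_append, List.nil_append]

theorem buildOrders_eq (perm : List Int) : buildOrders perm = ordersRec perm := by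
  unfold buildOrders
  rw [foldl_extendOne]
  simp

theorem dfsA_eq (perm : List Int) (fuel : Nat) :
    ∀ (i : Nat) (temp : List (Int × Int)) (acc : List (List (Int × Int))),
      i + fuel = perm.length →
      dfsA perm fuel i temp acc = acc ++ (ordersRec (perm.drop i)).map (temp ++ ·) := by
  induction fuel with
  | zero =>
      intro i temp acc h
      simp [dfsA, List.drop_eq_nil_of_le (by omega : perm.length ≤ i), ordersRec]
  | succ f ih =>
      intro i temp acc h
      have hi : i < perm.length := by omega
      have hrange : PySem.List.pyRange 0 2 1 = [0, 1] := by decide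
      have hget : PySem.List.pyGetD perm (i : Int) 0 = perm[i] := by
        rw [PySem.List.pyGetD_natCast]
        exact List.getD_eq_getElem perm 0 hi
      have hdrop : perm.drop i = perm[i] :: perm.drop (i + 1) :=
        List.drop_eq_getElem_cons hi
      have hm0 : PySem.Int.mod (0 + 1) 2 = 1 := by decide
      have hm1 : PySem.Int.mod (1 + 1) 2 = 0 := by decide
      show (PySem.List.pyRange 0 2 1).foldl _ acc = _
      rw [hrange]
      simp only [List.foldl_cons, List.foldl_nil, hget, hm0, hm1]
      rw [ih (i + 1) _ acc (by omega), ih (i + 1) _ _ (by omega)]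
      rw [hdrop]
      simp [ordersRec, List.map_append, List.map_map, Function.comp_def, List.append_assoc]

theorem dfsA_top (p : List Int) (acc : List (List (Int × Int))) :
    dfsA p p.length 0 [] acc = acc ++ ordersRec p := by
  rw [dfsA_eq p p.length 0 [] acc (by omega)]
  simp

-- ===== VERDICT (by name: the statement is the Claim_ definition above) =====
theorem get_card_orders_spec : Claim_equal_get_card_orders := by
  intro cards _
  unfold Spec_get_card_orders get_card_orders get_card_orders_alt
  apply PySem.List.foldl_congr_mem
  intro acc p hp
  have hlen : p.length = cards.length :=
    (PySem.List.perm_of_mem_permutations hp).length_eq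
  rw [← hlen, dfsA_top, buildOrders_eq]
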